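-- pv_equiv track=rewrite | github.com/kaq0817/Phoenixflowriselovable | phoenix_helper.py | plan_for_goal
-- ===== SOURCE A (Python) =====
-- def plan_for_goal(goal: str) -> list[str]:
--     g = (goal or "").strip().lower()
--     if not g:
--         return []
--
--     plan: list[str] = []
--
--     if "lovable" in g or "off lovable" in g or "escape lovable" in g:
--         plan.extend(
--             [
--                 "Scan the repo (scan project)",
--                 "List Lovable references (find lovable dependencies)",
--                 "Identify the AI/router/service file tied to Lovable",
--                 "Map env vars needed for deploy (.env, Cloudflare)",
--                 "Run local build/tests (run npm install, run npm run build)",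
--                 "Prepare Cloudflare Pages/Worker deploy checklist",
--                 "Verify domain cutover readiness (DNS + redirects + HTTPS)",
--             ]
--         )
--
--     if "cloudflare" in g or "pages" in g or "worker" in g or "deploy" in g:
--         plan.extend(
--             [
--                 "Confirm build command + output folder",
--                 "Confirm env vars (Supabase/OAuth/API keys)",
--                 "Attach custom domain + www redirect",
--                 "Smoke test key flows (login/checkout/forms)",
--             ]
--         )
--
--     if "etsy" in g or "oauth" in g:
--         plan.extend(
--             [
--                 "Search repo for Etsy OAuth config and redirect URIs",
--                 "Confirm callback route exists in app",
--                 "Confirm provider console callback matches production domain",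
--             ]
--         )
--
--     if "shopify" in g or "theme" in g:
--         plan.extend(
--             [
--                 "Open Shopify admin URL",
--                 "List theme issue symptoms and affected pages",
--                 "Check theme/app embed settings and storefront errors",
--             ]
--         )
--
--     if "suno" in g or "songs" in g or "music" in g:
--         plan.extend(
--             [
--                 "Define site music map (pages + moods + durations)",
--                 "Batch-generate drafts and keep top picks",
--                 "Export + name files consistently for the site",
--             ]
--         )
--
--     # Deduplicate while preserving order
--     seen = set()
--     deduped: list[str] = []
--     for item in plan:
--         if item not in seen:
--             seen.add(item)
--             deduped.append(item)
--     return deduped[:25]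
-- ===== SOURCE B (Python) =====
-- # Inverted rule table: keyword -> rule index.  All 20 action strings are distinct and
-- # there are fewer than 25 of them in total, so no dedup pass and no [:25] cap is needed,
-- # and an empty/blank goal matches no keyword, so no early return is needed either.
-- _KEYWORD_RULE = {
--     "lovable": 0,
--     "cloudflare": 1, "pages": 1, "worker": 1, "deploy": 1,
--     "etsy": 2, "oauth": 2,
--     "shopify": 3, "theme": 3,
--     "suno": 4, "songs": 4, "music": 4,
-- }
--
-- _ACTIONS = [
--     [
--         "Scan the repo (scan project)",
--         "List Lovable references (find lovable dependencies)",
--         "Identify the AI/router/service file tied to Lovable",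
--         "Map env vars needed for deploy (.env, Cloudflare)",
--         "Run local build/tests (run npm install, run npm run build)",
--         "Prepare Cloudflare Pages/Worker deploy checklist",
--         "Verify domain cutover readiness (DNS + redirects + HTTPS)",
--     ],
--     [
--         "Confirm build command + output folder",
--         "Confirm env vars (Supabase/OAuth/API keys)",
--         "Attach custom domain + www redirect",
--         "Smoke test key flows (login/checkout/forms)",
--     ],
--     [
--         "Search repo for Etsy OAuth config and redirect URIs",
--         "Confirm callback route exists in app",
--         "Confirm provider console callback matches production domain",
--     ],
--     [
--         "Open Shopify admin URL",
--         "List theme issue symptoms and affected pages",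
--         "Check theme/app embed settings and storefront errors",
--     ],
--     [
--         "Define site music map (pages + moods + durations)",
--         "Batch-generate drafts and keep top picks",
--         "Export + name files consistently for the site",
--     ],
-- ]
--
--
-- def plan_for_goal(goal: str) -> list[str]:
--     g = (goal or "").strip().lower()
--     matched = {i for kw, i in _KEYWORD_RULE.items() if kw in g}
--     return [a for i in range(len(_ACTIONS)) if i in matched for a in _ACTIONS[i]]
-- ===== Notes on version B (the rewrite author's own statement) =====
-- stated objective: simpler
-- what changed: Inverts the rules into a flat keyword-to-rule-index dict, collects the SET of matched rule indices, and emits the action lists by index; the early return, the seen-set dedup loop and the [:25] cap all disappear (the 20 action strings are distinct and fewer than 25, so they were no-ops).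
import Mathlib
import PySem

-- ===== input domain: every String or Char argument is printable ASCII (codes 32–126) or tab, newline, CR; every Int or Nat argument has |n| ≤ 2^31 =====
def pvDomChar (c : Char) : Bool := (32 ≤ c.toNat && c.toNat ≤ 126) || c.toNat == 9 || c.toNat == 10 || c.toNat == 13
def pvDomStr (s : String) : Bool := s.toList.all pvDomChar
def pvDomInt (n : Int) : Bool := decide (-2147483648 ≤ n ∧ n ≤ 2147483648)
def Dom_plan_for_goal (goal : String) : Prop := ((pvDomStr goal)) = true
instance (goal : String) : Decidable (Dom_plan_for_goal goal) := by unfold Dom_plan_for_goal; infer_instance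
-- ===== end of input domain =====

-- B inverts the rules into a flat keyword→rule-index table, collects the set of matched rule
-- indices and emits the action lists by index; the early return, the seen-set dedup loop and the
-- [:25] cap of A disappear (the 20 action strings are distinct and fewer than 25). Same cost.

-- ===== PORT A =====
def plan_for_goal (goal : String) : List String :=
  let g := PySem.Str.lower (PySem.Str.strip (if goal = "" then "" else goal))
  if g = "" then []
  else
    let plan : List String := []
    let plan := if PySem.Str.isIn "lovable" g || PySem.Str.isIn "off lovable" g ||
                   PySem.Str.isIn "escape lovable" g then
        plan ++ ["Scan the repo (scan project)",
                 "List Lovable references (find lovable dependencies)",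
                 "Identify the AI/router/service file tied to Lovable",
                 "Map env vars needed for deploy (.env, Cloudflare)",
                 "Run local build/tests (run npm install, run npm run build)",
                 "Prepare Cloudflare Pages/Worker deploy checklist",
                 "Verify domain cutover readiness (DNS + redirects + HTTPS)"]
      else plan
    let plan := if PySem.Str.isIn "cloudflare" g || PySem.Str.isIn "pages" g ||
                   PySem.Str.isIn "worker" g || PySem.Str.isIn "deploy" g then
        plan ++ ["Confirm build command + output folder",
                 "Confirm env vars (Supabase/OAuth/API keys)",
                 "Attach custom domain + www redirect",
                 "Smoke test key flows (login/checkout/forms)"]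
      else plan
    let plan := if PySem.Str.isIn "etsy" g || PySem.Str.isIn "oauth" g then
        plan ++ ["Search repo for Etsy OAuth config and redirect URIs",
                 "Confirm callback route exists in app",
                 "Confirm provider console callback matches production domain"]
      else plan
    let plan := if PySem.Str.isIn "shopify" g || PySem.Str.isIn "theme" g then
        plan ++ ["Open Shopify admin URL",
                 "List theme issue symptoms and affected pages",
                 "Check theme/app embed settings and storefront errors"]
      else plan
    let plan := if PySem.Str.isIn "suno" g || PySem.Str.isIn "songs" g ||
                   PySem.Str.isIn "music" g then
        plan ++ ["Define site music map (pages + moods + durations)",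
                 "Batch-generate drafts and keep top picks",
                 "Export + name files consistently for the site"]
      else plan
    -- seen = set(); deduplicate while preserving order
    let p := plan.foldl
      (fun (st : PySem.Set String × List String) item =>
        if st.1.contains item then st else (PySem.Set.add st.1 item, st.2 ++ [item]))
      (PySem.Set.empty, [])
    PySem.List.slice p.2 none (some 25)

-- ===== PORT B =====
-- _KEYWORD_RULE: the dict in insertion order (iterated only via .items())
def pvKwRule : List (String × Int) :=
  [("lovable", 0),
   ("cloudflare", 1), ("pages", 1), ("worker", 1), ("deploy", 1),
   ("etsy", 2), ("oauth", 2),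
   ("shopify", 3), ("theme", 3),
   ("suno", 4), ("songs", 4), ("music", 4)]

def pvActions : List (List String) :=
  [["Scan the repo (scan project)",
    "List Lovable references (find lovable dependencies)",
    "Identify the AI/router/service file tied to Lovable",
    "Map env vars needed for deploy (.env, Cloudflare)",
    "Run local build/tests (run npm install, run npm run build)",
    "Prepare Cloudflare Pages/Worker deploy checklist",
    "Verify domain cutover readiness (DNS + redirects + HTTPS)"],
   ["Confirm build command + output folder",
    "Confirm env vars (Supabase/OAuth/API keys)",
    "Attach custom domain + www redirect",
    "Smoke test key flows (login/checkout/forms)"],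
   ["Search repo for Etsy OAuth config and redirect URIs",
    "Confirm callback route exists in app",
    "Confirm provider console callback matches production domain"],
   ["Open Shopify admin URL",
    "List theme issue symptoms and affected pages",
    "Check theme/app embed settings and storefront errors"],
   ["Define site music map (pages + moods + durations)",
    "Batch-generate drafts and keep top picks",
    "Export + name files consistently for the site"]]

def plan_for_goal_alt (goal : String) : List String :=
  let g := PySem.Str.lower (PySem.Str.strip (if goal = "" then "" else goal))
  -- matched = {i for kw, i in _KEYWORD_RULE.items() if kw in g}
  let matched : PySem.Set Int :=
    PySem.Set.ofList ((pvKwRule.filter (fun p => PySem.Str.isIn p.1 g)).map Prod.snd)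
  -- [a for i in range(len(_ACTIONS)) if i in matched for a in _ACTIONS[i]]
  (PySem.List.pyRange 0 (PySem.List.len pvActions) 1).foldl
    (fun acc i => if matched.contains i then acc ++ PySem.List.pyGetD pvActions i [] else acc) []

-- ===== PRECONDITION & SPEC =====
def Spec_plan_for_goal (goal : String) (out : List String) : Prop := out = plan_for_goal_alt goal
instance (goal : String) (out : List String) : Decidable (Spec_plan_for_goal goal out) := by unfold Spec_plan_for_goal; infer_instance

-- ===== CLAIM (what is proved, stated in full; the proofs are below) =====
def Claim_equal_plan_for_goal : Prop := ∀ (goal : String), Dom_plan_for_goal goal → Spec_plan_for_goal goal (plan_for_goal goal)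

-- ===== LEMMAS AND PROOFS =====

-- A's seen-set loop keeps its two components equal and computes Set.update.
theorem foldl_seen_dedup (l : List String) (s : PySem.Set String) :
    l.foldl
      (fun (st : PySem.Set String × List String) item =>
        if st.1.contains item then st else (PySem.Set.add st.1 item, st.2 ++ [item]))
      (s, s)
    = (PySem.Set.update s l, PySem.Set.update s l) := by
  induction l generalizing s with
  | nil => simp [PySem.Set.update]
  | cons x xs ih =>
    rw [PySem.Set.update_cons]
    by_cases hx : x ∈ s
    · simpa [List.foldl, hx, PySem.Set.add_of_mem hx] using ih s
    · simpa [List.foldl, hx, PySem.Set.add_of_not_mem hx] using ih (PySem.Set.add s x)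

-- A's loop started at (∅, []) is exactly ordered deduplication (dict.fromkeys).
theorem seen_dedup_empty (l : List String) :
    (l.foldl
      (fun (st : PySem.Set String × List String) item =>
        if st.1.contains item then st else (PySem.Set.add st.1 item, st.2 ++ [item]))
      (PySem.Set.empty, [])).2
    = PySem.List.dedup l := by
  have h := foldl_seen_dedup l []
  simp only [PySem.Set.empty] at *
  rw [h]
  simp [PySem.Set.update_nil_left]

-- A's redundant "off lovable"/"escape lovable" checks collapse to the "lovable" check.
theorem lovable_cond (g : String) :
    (PySem.Str.isIn "lovable" g || PySem.Str.isIn "off lovable" g ||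
     PySem.Str.isIn "escape lovable" g) = PySem.Str.isIn "lovable" g := by
  have himp : ∀ sub : String, "lovable".toList <:+: sub.toList →
      PySem.Str.isIn sub g = true → PySem.Str.isIn "lovable" g = true := by
    intro sub hsub hin
    exact (PySem.Str.isIn_iff_infix _ _).mpr
      (hsub.trans ((PySem.Str.isIn_iff_infix _ _).mp hin))
  cases h : PySem.Str.isIn "lovable" g
  · cases h2 : PySem.Str.isIn "off lovable" g
    · cases h3 : PySem.Str.isIn "escape lovable" g
      · rfl
      · have := himp _ (by decide) h3; rw [h] at this; exact Bool.noConfusion this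
    · have := himp _ (by decide) h2; rw [h] at this; exact Bool.noConfusion this
  · rfl

-- B's matched set contains rule index i exactly when one of that rule's keywords occurs in g.
theorem contains_rule (g : String) (i : Int) (cond : Bool)
    (h : (∃ p, (p ∈ pvKwRule ∧ PySem.Str.isIn p.1 g = true) ∧ p.2 = i) ↔ cond = true) :
    (PySem.Set.ofList ((pvKwRule.filter (fun p => PySem.Str.isIn p.1 g)).map Prod.snd)).contains i
      = cond := by
  rw [Bool.eq_iff_iff, ← h]
  simp only [PySem.Set.contains, List.contains_iff_mem, PySem.Set.mem_ofList, List.mem_map,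
    List.mem_filter]

theorem contains0 (g : String) :
    (PySem.Set.ofList ((pvKwRule.filter (fun p => PySem.Str.isIn p.1 g)).map Prod.snd)).contains 0
      = PySem.Str.isIn "lovable" g := by
  apply contains_rule
  constructor
  · rintro ⟨⟨a, b⟩, ⟨h3, h4⟩, h2⟩
    simp only at h2; subst h2
    simp only [pvKwRule, List.mem_cons, List.not_mem_nil] at h3
    rcases h3 with h|h|h|h|h|h|h|h|h|h|h|h|h <;> simp_all
  · intro h
    exact ⟨("lovable", 0), ⟨by simp [pvKwRule], h⟩, rfl⟩

theorem contains1 (g : String) :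
    (PySem.Set.ofList ((pvKwRule.filter (fun p => PySem.Str.isIn p.1 g)).map Prod.snd)).contains 1
      = (PySem.Str.isIn "cloudflare" g || PySem.Str.isIn "pages" g ||
         PySem.Str.isIn "worker" g || PySem.Str.isIn "deploy" g) := by
  apply contains_rule
  rw [Bool.or_eq_true, Bool.or_eq_true, Bool.or_eq_true]
  constructor
  · rintro ⟨⟨a, b⟩, ⟨h3, h4⟩, h2⟩
    simp only at h2; subst h2
    simp only [pvKwRule, List.mem_cons, List.not_mem_nil] at h3
    rcases h3 with h|h|h|h|h|h|h|h|h|h|h|h|h <;> simp_all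
  · rintro (((h|h)|h)|h)
    · exact ⟨("cloudflare", 1), ⟨by simp [pvKwRule], h⟩, rfl⟩
    · exact ⟨("pages", 1), ⟨by simp [pvKwRule], h⟩, rfl⟩
    · exact ⟨("worker", 1), ⟨by simp [pvKwRule], h⟩, rfl⟩
    · exact ⟨("deploy", 1), ⟨by simp [pvKwRule], h⟩, rfl⟩

theorem contains2 (g : String) :
    (PySem.Set.ofList ((pvKwRule.filter (fun p => PySem.Str.isIn p.1 g)).map Prod.snd)).contains 2
      = (PySem.Str.isIn "etsy" g || PySem.Str.isIn "oauth" g) := by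
  apply contains_rule
  rw [Bool.or_eq_true]
  constructor
  · rintro ⟨⟨a, b⟩, ⟨h3, h4⟩, h2⟩
    simp only at h2; subst h2
    simp only [pvKwRule, List.mem_cons, List.not_mem_nil] at h3
    rcases h3 with h|h|h|h|h|h|h|h|h|h|h|h|h <;> simp_all
  · rintro (h|h)
    · exact ⟨("etsy", 2), ⟨by simp [pvKwRule], h⟩, rfl⟩
    · exact ⟨("oauth", 2), ⟨by simp [pvKwRule], h⟩, rfl⟩

theorem contains3 (g : String) :
    (PySem.Set.ofList ((pvKwRule.filter (fun p => PySem.Str.isIn p.1 g)).map Prod.snd)).contains 3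
      = (PySem.Str.isIn "shopify" g || PySem.Str.isIn "theme" g) := by
  apply contains_rule
  rw [Bool.or_eq_true]
  constructor
  · rintro ⟨⟨a, b⟩, ⟨h3, h4⟩, h2⟩
    simp only at h2; subst h2
    simp only [pvKwRule, List.mem_cons, List.not_mem_nil] at h3
    rcases h3 with h|h|h|h|h|h|h|h|h|h|h|h|h <;> simp_all
  · rintro (h|h)
    · exact ⟨("shopify", 3), ⟨by simp [pvKwRule], h⟩, rfl⟩
    · exact ⟨("theme", 3), ⟨by simp [pvKwRule], h⟩, rfl⟩

theorem contains4 (g : String) :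
    (PySem.Set.ofList ((pvKwRule.filter (fun p => PySem.Str.isIn p.1 g)).map Prod.snd)).contains 4
      = (PySem.Str.isIn "suno" g || PySem.Str.isIn "songs" g || PySem.Str.isIn "music" g) := by
  apply contains_rule
  rw [Bool.or_eq_true, Bool.or_eq_true]
  constructor
  · rintro ⟨⟨a, b⟩, ⟨h3, h4⟩, h2⟩
    simp only at h2; subst h2
    simp only [pvKwRule, List.mem_cons, List.not_mem_nil] at h3
    rcases h3 with h|h|h|h|h|h|h|h|h|h|h|h|h <;> simp_all
  · rintro ((h|h)|h)
    · exact ⟨("suno", 4), ⟨by simp [pvKwRule], h⟩, rfl⟩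
    · exact ⟨("songs", 4), ⟨by simp [pvKwRule], h⟩, rfl⟩
    · exact ⟨("music", 4), ⟨by simp [pvKwRule], h⟩, rfl⟩

-- range(len(_ACTIONS)) is [0,1,2,3,4]
theorem pyRange_actions : PySem.List.pyRange 0 (PySem.List.len pvActions) 1 = [0, 1, 2, 3, 4] := by
  decide

-- ===== VERDICT (by name: the statement is the Claim_ definition above) =====
set_option maxHeartbeats 4000000 in
theorem plan_for_goal_spec : Claim_equal_plan_for_goal := by
  intro goal _
  unfold Spec_plan_for_goal plan_for_goal plan_for_goal_alt
  rw [pyRange_actions]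
  set g := PySem.Str.lower (PySem.Str.strip (if goal = "" then "" else goal)) with hg
  simp only [List.foldl_cons, List.foldl_nil, contains0, contains1, contains2, contains3,
    contains4, lovable_cond]
  by_cases hge : g = ""
  · rw [hge]; decide
  · simp only [if_neg hge]
    rw [seen_dedup_empty]
    by_cases b0 : PySem.Str.isIn "lovable" g <;>
    by_cases b1 : (PySem.Str.isIn "cloudflare" g || PySem.Str.isIn "pages" g ||
        PySem.Str.isIn "worker" g || PySem.Str.isIn "deploy" g) <;>
    by_cases b2 : (PySem.Str.isIn "etsy" g || PySem.Str.isIn "oauth" g) <;>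
    by_cases b3 : (PySem.Str.isIn "shopify" g || PySem.Str.isIn "theme" g) <;>
    by_cases b4 : (PySem.Str.isIn "suno" g || PySem.Str.isIn "songs" g ||
        PySem.Str.isIn "music" g) <;>
    simp only [b0, b1, b2, b3, b4, if_true, if_false, Bool.false_eq_true] <;> decide
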